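-- pv_equiv track=rewrite | github.com/danishhraza/competitive-programming | Week 2/dream2.py | check_scenario
-- ===== SOURCE A (Python) =====
-- def check_scenario(event_stack, m, scenario_events):
--     for i in range(len(event_stack) + 1):
--         current_events = event_stack[:len(event_stack) - i]
--         if is_scenario_possible(current_events, scenario_events):
--             if i == 0:
--                 return "Yes"
--             else:
--                 return f"{i} Just A Dream"
--     return "Plot Error"
--
-- def is_scenario_possible(current_events, scenario_events):
--     for scenario_event in scenario_events:
--         if scenario_event.startswith('!'):
--             event_name = scenario_event[1:]
--             if event_name in current_events:
--                 return False
--         else: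
--             if scenario_event not in current_events:
--                 return False
--     return True
-- ===== SOURCE B (Python) =====
-- def check_scenario(event_stack, m, scenario_events):
--     # One pass: first-occurrence index of every event, then derive the
--     # feasible prefix-length interval [lo, hi] from the constraints.
--     first = {}
--     for idx, e in enumerate(event_stack):
--         if e not in first:
--             first[e] = idx
--     n = len(event_stack)
--     lo, hi = 0, n
--     for s in scenario_events:
--         if s.startswith('!'):
--             name = s[1:]
--             if name in first:
--                 hi = min(hi, first[name])
--         else:
--             if s not in first:
--                 return "Plot Error"
--             lo = max(lo, first[s] + 1)
--     if lo > hi: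
--         return "Plot Error"
--     i = n - hi
--     return "Yes" if i == 0 else f"{i} Just A Dream"
-- ===== Notes on version B (the rewrite author's own statement) =====
-- stated objective: faster
-- what changed: Replaced A's outer loop that re-checks every constraint against each successively shorter prefix with a single first-occurrence index dict plus one pass over the constraints deriving the feasible prefix-length interval [lo, hi]; the answer is read off the interval.
import Mathlib
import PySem

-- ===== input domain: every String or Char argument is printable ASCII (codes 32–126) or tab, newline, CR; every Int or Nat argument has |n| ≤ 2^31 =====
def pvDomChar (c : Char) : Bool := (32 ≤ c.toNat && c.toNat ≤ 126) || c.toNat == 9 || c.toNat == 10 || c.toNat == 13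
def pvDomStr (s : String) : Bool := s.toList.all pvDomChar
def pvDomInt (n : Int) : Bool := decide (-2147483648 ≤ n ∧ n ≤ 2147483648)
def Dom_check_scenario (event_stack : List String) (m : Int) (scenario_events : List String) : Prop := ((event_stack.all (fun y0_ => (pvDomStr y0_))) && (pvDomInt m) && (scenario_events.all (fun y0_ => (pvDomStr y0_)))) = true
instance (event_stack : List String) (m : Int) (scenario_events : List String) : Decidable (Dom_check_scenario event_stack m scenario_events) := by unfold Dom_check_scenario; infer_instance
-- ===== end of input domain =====

-- ===== PORT A =====
-- B replaces A's quadratic scan over ever-shorter prefixes by one first-occurrence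
-- index pass plus a feasible prefix-length interval (objective: faster).
def is_scenario_possible (current_events : List String) : List String → Bool
  | [] => true
  | scenario_event :: rest =>
    if PySem.Str.startswith scenario_event "!" then
      let event_name := PySem.Str.slice scenario_event (some 1) none
      if event_name ∈ current_events then false
      else is_scenario_possible current_events rest
    else
      if scenario_event ∈ current_events then is_scenario_possible current_events rest
      else false

-- A's 'for i in range(len(event_stack) + 1)' with early return
def check_scenario_loop (event_stack scenario_events : List String) : List Int → String
  | [] => "Plot Error"
  | i :: rest =>
    let current_events := PySem.List.slice event_stack none (some ((event_stack.length : Int) - i))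
    if is_scenario_possible current_events scenario_events then
      if i = 0 then "Yes" else PySem.Int.toStr i ++ " Just A Dream"
    else check_scenario_loop event_stack scenario_events rest

def check_scenario (event_stack : List String) (m : Int) (scenario_events : List String) : String :=
  check_scenario_loop event_stack scenario_events
    (PySem.List.pyRange 0 ((event_stack.length : Int) + 1) 1)

-- ===== PORT B =====
-- first = {}; for idx, e in enumerate(event_stack): if e not in first: first[e] = idx
def firstOccDict (event_stack : List String) : PySem.Dict String Int :=
  (PySem.List.enumerate event_stack 0).foldl
    (fun d p => if d.contains p.2 then d else d.insert p.2 p.1) PySem.Dict.empty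

-- the constraint loop: narrows [lo, hi]; none = the early 'return "Plot Error"'
def scanConstraints (first : PySem.Dict String Int) : List String → Int → Int → Option (Int × Int)
  | [], lo, hi => some (lo, hi)
  | s :: rest, lo, hi =>
    if PySem.Str.startswith s "!" then
      let name := PySem.Str.slice s (some 1) none
      match first.get? name with
      | some j => scanConstraints first rest lo (min hi j)
      | none => scanConstraints first rest lo hi
    else
      match first.get? s with
      | some j => scanConstraints first rest (max lo (j + 1)) hi
      | none => none

def check_scenario_alt (event_stack : List String) (m : Int) (scenario_events : List String) : String :=
  let first := firstOccDict event_stack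
  let n : Int := event_stack.length
  match scanConstraints first scenario_events 0 n with
  | none => "Plot Error"
  | some (lo, hi) =>
    if lo > hi then "Plot Error"
    else
      let i := n - hi
      if i = 0 then "Yes" else PySem.Int.toStr i ++ " Just A Dream"

-- ===== PRECONDITION & SPEC =====
def Spec_check_scenario (event_stack : List String) (m : Int) (scenario_events : List String) (out : String) : Prop := out = check_scenario_alt event_stack m scenario_events
instance (event_stack : List String) (m : Int) (scenario_events : List String) (out : String) : Decidable (Spec_check_scenario event_stack m scenario_events out) := by unfold Spec_check_scenario; infer_instance

-- ===== CLAIM (what is proved, stated in full; the proofs are below) =====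
def Claim_equal_check_scenario : Prop := ∀ (event_stack : List String) (m : Int) (scenario_events : List String), Dom_check_scenario event_stack m scenario_events → Spec_check_scenario event_stack m scenario_events (check_scenario event_stack m scenario_events)

-- ===== LEMMAS AND PROOFS =====

lemma build_get? (es : List String) : ∀ (k : Int) (d : PySem.Dict String Int) (e : String),
    ((PySem.List.enumerate es k).foldl
        (fun d p => if d.contains p.2 then d else d.insert p.2 p.1) d).get? e
      = if d.contains e then d.get? e
        else (PySem.List.index? es e).map (fun j => k + (j : Int)) := by
  induction es with
  | nil =>
    intro k d e
    simp only [PySem.List.enumerate_nil, List.foldl_nil]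
    by_cases he : d.contains e = true
    · simp [he]
    · simp only [Bool.not_eq_true] at he
      simp [he, (PySem.Dict.get?_eq_none_iff_contains d e).2 he, PySem.List.index?_eq_idxOf?,
        List.idxOf?]
  | cons x xs ih =>
    intro k d e
    rw [PySem.List.enumerate_cons]
    simp only [List.foldl_cons]
    by_cases hx : d.contains x = true
    · simp only [hx, if_true]
      rw [ih]
      by_cases he : d.contains e = true
      · simp [he]
      · have hne : x ≠ e := by rintro rfl; simp [hx] at he
        simp only [he, Bool.false_eq_true, if_false,
          PySem.List.index?_cons_of_ne _ hne]
        cases PySem.List.index? xs e with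
        | none => simp
        | some j => simp; ring
    · simp only [hx, Bool.false_eq_true, if_false]
      rw [ih]
      by_cases hxe : e = x
      · subst hxe
        simp only [PySem.Dict.contains_insert_self, PySem.Dict.get?_insert_self, hx,
          Bool.false_eq_true, if_false, PySem.List.index?_cons_self]
        simp
      · have hc : (d.insert x k).contains e = d.contains e := by
          rw [PySem.Dict.contains_insert]; simp [hxe]
        rw [hc, PySem.Dict.get?_insert_of_ne (hne := hxe)]
        by_cases he : d.contains e = true
        · simp [he]
        · have hne : x ≠ e := fun h => hxe h.symm
          simp only [he, Bool.false_eq_true, if_false,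
            PySem.List.index?_cons_of_ne _ hne]
          cases PySem.List.index? xs e with
          | none => simp
          | some j => simp; ring

lemma firstOccDict_get? (es : List String) (e : String) :
    (firstOccDict es).get? e = (PySem.List.index? es e).map (fun j => (j : Int)) := by
  rw [firstOccDict, build_get?]
  simp [PySem.Dict.contains_empty]

lemma mem_take_iff_index? (es : List String) (e : String) : ∀ (L : Nat),
    e ∈ es.take L ↔ ∃ j, PySem.List.index? es e = some j ∧ j < L := by
  simp only [PySem.List.index?_eq_idxOf?]
  induction es with
  | nil => intro L; simp [List.idxOf?]
  | cons x xs ih =>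
    intro L
    cases L with
    | zero => simp
    | succ L =>
      rw [List.take_succ_cons]
      by_cases hxe : x = e
      · subst hxe
        simp [List.idxOf?_cons]
      · simp only [List.mem_cons, List.idxOf?_cons, beq_iff_eq, hxe, if_false]
        rw [ih L]
        constructor
        · rintro (rfl | ⟨j, hj, hlt⟩)
          · exact absurd rfl hxe
          · exact ⟨j + 1, by simp [hj], by omega⟩
        · rintro ⟨j, hj, hlt⟩
          cases h : List.idxOf? e xs with
          | none => rw [h] at hj; simp at hj
          | some j' =>
            rw [h] at hj; simp at hj
            exact Or.inr ⟨j', rfl, by omega⟩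

lemma scan_mono (first : PySem.Dict String Int) : ∀ (scen : List String) (lo hi lo' hi' : Int),
    scanConstraints first scen lo hi = some (lo', hi') → lo ≤ lo' ∧ hi' ≤ hi := by
  intro scen
  induction scen with
  | nil => intro lo hi lo' hi' h; simp [scanConstraints] at h; omega
  | cons s rest ih =>
    intro lo hi lo' hi' h
    rw [scanConstraints] at h
    by_cases hb : PySem.Str.startswith s "!" = true
    · rw [if_pos hb] at h
      cases hg : (first.get? (PySem.Str.slice s (some 1) none)) with
      | some j => simp only [hg] at h; have := ih _ _ _ _ h; constructor <;> [exact this.1; omega]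
      | none => simp only [hg] at h; exact ih _ _ _ _ h
    · rw [if_neg hb] at h
      cases hg : first.get? s with
      | some j => simp only [hg] at h; have := ih _ _ _ _ h; constructor <;> [omega; exact this.2]
      | none => simp only [hg] at h; simp at h

lemma scan_iff (es : List String) : ∀ (scen : List String) (lo hi : Int) (L : Nat),
    (is_scenario_possible (es.take L) scen = true ∧ lo ≤ (L : Int) ∧ (L : Int) ≤ hi) ↔
    (∃ lo' hi', scanConstraints (firstOccDict es) scen lo hi = some (lo', hi') ∧
        lo' ≤ (L : Int) ∧ (L : Int) ≤ hi') := by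
  intro scen
  induction scen with
  | nil =>
    intro lo hi L
    simp [is_scenario_possible, scanConstraints]
  | cons s rest ih =>
    intro lo hi L
    rw [is_scenario_possible, scanConstraints]
    by_cases hb : PySem.Str.startswith s "!" = true
    · rw [if_pos hb, if_pos hb]
      set name := PySem.Str.slice s (some 1) none with hname
      cases h : PySem.List.index? es name with
      | some jn =>
        have hget : (firstOccDict es).get? name = some ((jn : Nat) : Int) := by
          rw [firstOccDict_get?, h]; simp
        simp only [hget]
        by_cases hmem : name ∈ es.take L
        · rw [if_pos hmem]
          have hlt : jn < L := by
            obtain ⟨j', hj', hlt⟩ := (mem_take_iff_index? es name L).1 hmem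
            rw [h] at hj'; cases hj'; exact hlt
          rw [← ih lo (min hi (jn : Int)) L]
          constructor
          · rintro ⟨hfalse, -⟩; exact absurd hfalse (by simp)
          · rintro ⟨-, -, h3⟩; exfalso; omega
        · rw [if_neg hmem]
          have hge : (L : Int) ≤ (jn : Int) := by
            by_contra hlt
            exact hmem ((mem_take_iff_index? es name L).2 ⟨jn, h, by omega⟩)
          rw [← ih lo (min hi (jn : Int)) L]
          constructor <;> rintro ⟨h1, h2, h3⟩ <;> exact ⟨h1, by omega, by omega⟩
      | none =>
        have hget : (firstOccDict es).get? name = none := by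
          rw [firstOccDict_get?, h]; simp
        simp only [hget]
        have hnm : name ∉ es := (PySem.List.index?_eq_none_iff _ _).1 h
        have hnt : name ∉ es.take L := fun hm => hnm (List.mem_of_mem_take hm)
        rw [if_neg hnt]
        exact ih lo hi L
    · rw [if_neg hb, if_neg hb]
      cases h : PySem.List.index? es s with
      | some jn =>
        have hget : (firstOccDict es).get? s = some ((jn : Nat) : Int) := by
          rw [firstOccDict_get?, h]; simp
        simp only [hget]
        by_cases hmem : s ∈ es.take L
        · rw [if_pos hmem]
          have hlt : jn < L := by
            obtain ⟨j', hj', hlt⟩ := (mem_take_iff_index? es s L).1 hmem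
            rw [h] at hj'; cases hj'; exact hlt
          rw [← ih (max lo ((jn : Int) + 1)) hi L]
          constructor <;> rintro ⟨h1, h2, h3⟩ <;> exact ⟨h1, by omega, by omega⟩
        · rw [if_neg hmem]
          constructor
          · rintro ⟨hfalse, -⟩; exact absurd hfalse (by simp)
          · rintro ⟨lo', hi', hscan, hlo, hhi⟩
            have h2 := (ih (max lo ((jn : Int) + 1)) hi L).2 ⟨lo', hi', hscan, hlo, hhi⟩
            exact absurd ((mem_take_iff_index? es s L).2 ⟨jn, h, by omega⟩) hmem
      | none =>
        have hget : (firstOccDict es).get? s = none := by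
          rw [firstOccDict_get?, h]; simp
        simp only [hget]
        have hnm : s ∉ es := (PySem.List.index?_eq_none_iff _ _).1 h
        have hnt : s ∉ es.take L := fun hm => hnm (List.mem_of_mem_take hm)
        rw [if_neg hnt]
        simp

lemma loop_all_false (es scen : List String) : ∀ (l : List Int),
    (∀ i ∈ l, is_scenario_possible (PySem.List.slice es none (some ((es.length : Int) - i))) scen = false) →
    check_scenario_loop es scen l = "Plot Error" := by
  intro l
  induction l with
  | nil => intro _; rfl
  | cons i rest ih =>
    intro h
    rw [check_scenario_loop]
    simp only [h i (List.mem_cons_self), Bool.false_eq_true, if_false]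
    exact ih (fun i' hi' => h i' (List.mem_cons_of_mem _ hi'))

lemma loop_found (es scen : List String) : ∀ (l1 : List Int) (i : Int) (l2 : List Int),
    (∀ i' ∈ l1, is_scenario_possible (PySem.List.slice es none (some ((es.length : Int) - i'))) scen = false) →
    is_scenario_possible (PySem.List.slice es none (some ((es.length : Int) - i))) scen = true →
    check_scenario_loop es scen (l1 ++ i :: l2)
      = if i = 0 then "Yes" else PySem.Int.toStr i ++ " Just A Dream" := by
  intro l1
  induction l1 with
  | nil =>
    intro i l2 _ hi
    rw [List.nil_append, check_scenario_loop]
    simp only [hi, if_true]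
  | cons x rest ih =>
    intro i l2 h hi
    rw [List.cons_append, check_scenario_loop]
    simp only [h x (List.mem_cons_self), Bool.false_eq_true, if_false]
    exact ih i l2 (fun i' hi' => h i' (List.mem_cons_of_mem _ hi')) hi

lemma check_scenario_eq_alt : ∀ (event_stack : List String) (m : Int) (scenario_events : List String),
    check_scenario event_stack m scenario_events = check_scenario_alt event_stack m scenario_events := by
  intro es m scen
  rw [check_scenario, check_scenario_alt]
  simp only []
  set n : Int := (es.length : Int) with hn
  have hn0 : 0 ≤ n := by positivity
  -- the feasibility of an i in range
  have hslice : ∀ i : Int, 0 ≤ i → i ≤ n →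
      PySem.List.slice es none (some (n - i)) = es.take (n - i).toNat := by
    intro i h0 h1
    exact PySem.List.slice_to es (by omega)
  cases hscan : scanConstraints (firstOccDict es) scen 0 n with
  | none =>
    rw [loop_all_false]
    intro i hi
    rw [PySem.List.mem_pyRange_one] at hi
    rw [hslice i hi.1 (by omega)]
    by_contra hT
    rw [Bool.not_eq_false] at hT
    have hL : ((n - i).toNat : Int) = n - i := by omega
    have := (scan_iff es scen 0 n (n - i).toNat).1 ⟨hT, by omega, by omega⟩
    obtain ⟨lo', hi', hs, -, -⟩ := this
    rw [hscan] at hs; simp at hs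
  | some p =>
    obtain ⟨lo, hi⟩ := p
    show check_scenario_loop es scen (PySem.List.pyRange 0 (n + 1) 1)
      = if lo > hi then "Plot Error"
        else if n - hi = 0 then "Yes" else PySem.Int.toStr (n - hi) ++ " Just A Dream"
    have hmono := scan_mono (firstOccDict es) scen 0 n lo hi hscan
    by_cases hle : lo > hi
    · rw [if_pos hle]
      rw [loop_all_false]
      intro i hi'
      rw [PySem.List.mem_pyRange_one] at hi'
      rw [hslice i hi'.1 (by omega)]
      by_contra hT
      rw [Bool.not_eq_false] at hT
      have hL : ((n - i).toNat : Int) = n - i := by omega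
      obtain ⟨lo', hi', hs, h1, h2⟩ := (scan_iff es scen 0 n (n - i).toNat).1 ⟨hT, by omega, by omega⟩
      rw [hscan] at hs
      simp only [Option.some.injEq, Prod.mk.injEq] at hs
      omega
    · rw [if_neg hle]
      rw [not_lt] at hle
      have h0lo : 0 ≤ lo := hmono.1
      have hhin : hi ≤ n := hmono.2
      have h0hi : 0 ≤ hi := le_trans h0lo hle
      set i : Int := n - hi with hidef
      have h0i : 0 ≤ i := by omega
      have hin : i ≤ n := by omega
      -- the prefix at i is feasible
      have hLcast : ((n - i).toNat : Int) = hi := by omega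
      have hfeas : is_scenario_possible (es.take (n - i).toNat) scen = true := by
        have := (scan_iff es scen 0 n (n - i).toNat).2 ⟨lo, hi, hscan, by omega, by omega⟩
        exact this.1
      -- every earlier i' fails
      have hfail : ∀ i' ∈ PySem.List.pyRange 0 i 1,
          is_scenario_possible (PySem.List.slice es none (some (n - i'))) scen = false := by
        intro i' hi'
        rw [PySem.List.mem_pyRange_one] at hi'
        rw [hslice i' hi'.1 (by omega)]
        by_contra hT
        rw [Bool.not_eq_false] at hT
        have hL : ((n - i').toNat : Int) = n - i' := by omega
        obtain ⟨lo', hi', hs, h1, h2⟩ := (scan_iff es scen 0 n (n - i').toNat).1 ⟨hT, by omega, by omega⟩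
        rw [hscan] at hs
        simp only [Option.some.injEq, Prod.mk.injEq] at hs
        omega
      have hsplit : PySem.List.pyRange 0 (n + 1) 1
          = PySem.List.pyRange 0 i 1 ++ i :: PySem.List.pyRange (i + 1) (n + 1) 1 := by
        rw [PySem.List.pyRange_one_append 0 i (n + 1) h0i (by omega),
          PySem.List.pyRange_one_cons (a := i) (b := n + 1) (by omega)]
      rw [hsplit, loop_found es scen _ i _ hfail (by rw [hslice i h0i hin]; exact hfeas)]

-- ===== VERDICT (by name: the statement is the Claim_ definition above) =====
theorem check_scenario_spec : Claim_equal_check_scenario := by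
  intro event_stack m scenario_events _
  unfold Spec_check_scenario
  exact check_scenario_eq_alt event_stack m scenario_events
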